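-- pv_equiv track=rewrite | github.com/terana/data-visualisation | src/datavis/LayeredTreeDraw.py | _merge_contours
-- ===== SOURCE A (Python) =====
-- def _merge_contours(shift, contour_left, contour_right):
--     contour = []
--
--     for i in range(max(len(contour_left), len(contour_right))):
--         if i < len(contour_right):
--             right = contour_right[i][1] + shift
--         else:
--             # i must be < len(contour_left)
--             right = contour_left[i][1]
--
--         if i < len(contour_left):
--             left = contour_left[i][0]
--         else:
--             # i must be < len(contour_right)
--             left = contour_right[i][0]
--
--         contour.append((left, right))
--
--     return contour
-- ===== SOURCE B (Python) =====
-- def _merge_contours(shift, contour_left, contour_right):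
--     prefix = [(l[0], r[1] + shift) for l, r in zip(contour_left, contour_right)]
--     if len(contour_left) > len(contour_right):
--         tail = [(l[0], l[1]) for l in contour_left[len(contour_right):]]
--     else:
--         tail = [(r[0], r[1] + shift) for r in contour_right[len(contour_left):]]
--     return prefix + tail
-- ===== Notes on version B (the rewrite author's own statement) =====
-- stated objective: simpler
-- what changed: Replaces the index loop with per-index bound checks by a zip comprehension for the common prefix plus one map over the longer contour's tail slice.
import Mathlib
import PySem

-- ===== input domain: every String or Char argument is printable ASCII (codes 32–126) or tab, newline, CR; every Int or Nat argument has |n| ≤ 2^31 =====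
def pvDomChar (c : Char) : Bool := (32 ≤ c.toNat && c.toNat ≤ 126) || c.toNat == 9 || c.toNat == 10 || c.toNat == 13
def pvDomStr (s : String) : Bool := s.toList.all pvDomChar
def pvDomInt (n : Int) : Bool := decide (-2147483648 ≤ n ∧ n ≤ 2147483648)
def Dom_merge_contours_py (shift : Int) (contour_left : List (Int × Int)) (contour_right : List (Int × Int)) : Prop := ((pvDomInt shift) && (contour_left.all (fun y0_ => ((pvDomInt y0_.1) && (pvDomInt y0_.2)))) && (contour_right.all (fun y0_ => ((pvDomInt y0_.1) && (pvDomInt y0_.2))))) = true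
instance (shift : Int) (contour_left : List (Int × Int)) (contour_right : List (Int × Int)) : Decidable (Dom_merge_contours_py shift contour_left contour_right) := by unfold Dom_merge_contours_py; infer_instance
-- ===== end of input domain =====

-- B replaces the index loop with bound checks by a zip-prefix comprehension plus one map over the longer contour's tail slice (objective: simpler; same value for every input).


-- ===== PORT A =====
-- Literal port of A: loop over range(max(len(L), len(R))), appending (left, right).
-- Indexing contour_right[i] / contour_left[i] is always in range where it is evaluated
-- (the branch conditions guarantee it), so pyGetD's default (0, 0) is never used.
def merge_contours_py (shift : Int) (contour_left : List (Int × Int)) (contour_right : List (Int × Int)) : List (Int × Int) :=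
  (PySem.List.pyRange 0 (max (contour_left.length : Int) (contour_right.length : Int)) 1).foldl
    (fun contour i =>
      let right : Int :=
        if i < (contour_right.length : Int) then (PySem.List.pyGetD contour_right i (0, 0)).2 + shift
        else (PySem.List.pyGetD contour_left i (0, 0)).2
      let left : Int :=
        if i < (contour_left.length : Int) then (PySem.List.pyGetD contour_left i (0, 0)).1
        else (PySem.List.pyGetD contour_right i (0, 0)).1
      contour ++ [(left, right)]) []

-- ===== PORT B =====
-- Port of B: zip prefix, then the tail of whichever contour is longer (left tail unshifted).
def merge_contours_py_alt (shift : Int) (contour_left : List (Int × Int)) (contour_right : List (Int × Int)) : List (Int × Int) :=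
  (List.zipWith (fun l r => (l.1, r.2 + shift)) contour_left contour_right) ++
  (if contour_right.length < contour_left.length then
     (contour_left.drop contour_right.length).map (fun l => (l.1, l.2))
   else
     (contour_right.drop contour_left.length).map (fun r => (r.1, r.2 + shift)))

-- ===== PRECONDITION & SPEC =====
def Spec_merge_contours_py (shift : Int) (contour_left : List (Int × Int)) (contour_right : List (Int × Int)) (out : List (Int × Int)) : Prop := out = merge_contours_py_alt shift contour_left contour_right
instance (shift : Int) (contour_left : List (Int × Int)) (contour_right : List (Int × Int)) (out : List (Int × Int)) : Decidable (Spec_merge_contours_py shift contour_left contour_right out) := by unfold Spec_merge_contours_py; infer_instance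

-- ===== CLAIM (what is proved, stated in full; the proofs are below) =====
def Claim_equal_merge_contours_py : Prop := ∀ (shift : Int) (contour_left : List (Int × Int)) (contour_right : List (Int × Int)), Dom_merge_contours_py shift contour_left contour_right → Spec_merge_contours_py shift contour_left contour_right (merge_contours_py shift contour_left contour_right)

-- ===== LEMMAS AND PROOFS =====

lemma merge_eq (shift : Int) (L R : List (Int × Int)) : merge_contours_py shift L R = merge_contours_py_alt shift L R := by
  unfold merge_contours_py merge_contours_py_alt
  rw [PySem.List.foldl_append_singleton_eq_map, List.nil_append]
  apply List.ext_getElem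
  · rw [List.length_map, PySem.List.length_pyRange_one, List.length_append, List.length_zipWith]
    split_ifs <;> simp <;> omega
  · intro i h1 h2
    have hi : i < max L.length R.length := by
      rw [List.length_map, PySem.List.length_pyRange_one] at h1; omega
    simp only [List.getElem_map, PySem.List.getElem_pyRange_one, zero_add,
      PySem.List.pyGetD_natCast, Nat.cast_lt]
    by_cases hmin : i < min L.length R.length
    · rw [List.getElem_append_left (by simp; omega)]
      have hL : i < L.length := by omega
      have hR : i < R.length := by omega
      simp [hL, hR]
    · rw [List.getElem_append_right (by simp; omega)]
      by_cases hc : R.length < L.length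
      · have hL : i < L.length := by omega
        have hR : ¬ i < R.length := by omega
        simp only [hc, if_true, List.getElem_map, List.getElem_drop, hL, hR, if_false,
          List.length_zipWith, List.getD_eq_getElem L (0,0) hL,
          show R.length + (i - min L.length R.length) = i from by omega]
      · have hR : i < R.length := by omega
        have hL : ¬ i < L.length := by omega
        simp only [hc, if_false, List.getElem_map, List.getElem_drop, hL, hR, if_true,
          List.length_zipWith, List.getD_eq_getElem R (0,0) hR,
          show L.length + (i - min L.length R.length) = i from by omega]

-- ===== VERDICT (by name: the statement is the Claim_ definition above) =====
theorem merge_contours_py_spec : Claim_equal_merge_contours_py := by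
  intro shift L R _
  unfold Spec_merge_contours_py
  exact merge_eq shift L R
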